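-- pv_equiv track=rewrite | github.com/lilrooness/adventofcode2021 | advent_2.py | get_final_dh
-- ===== SOURCE A (Python) =====
-- def get_final_dh(instructions, starting_depth=0, starting_horizontal=0):
-- 	depth = starting_depth
-- 	horizontal = starting_horizontal
--
-- 	for code, x in instructions:
-- 		if code == "forward":
-- 			horizontal += x
-- 		elif code == "down":
-- 			depth += x
-- 		elif code == "up":
-- 			depth -= x
--
-- 	return (depth, horizontal)
-- ===== SOURCE B (Python) =====
-- def get_final_dh(instructions, starting_depth=0, starting_horizontal=0):
--     items = list(instructions)
--     horizontal = starting_horizontal + sum(x for c, x in items if c == "forward")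
--     depth = (starting_depth
--              + sum(x for c, x in items if c == "down")
--              - sum(x for c, x in items if c == "up"))
--     return (depth, horizontal)
-- ===== Notes on version B (the rewrite author's own statement) =====
-- stated objective: idiomatic
-- what changed: Replaces the single branchy accumulation loop with three filtered generator sums, one per command kind, combined arithmetically.
import Mathlib
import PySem

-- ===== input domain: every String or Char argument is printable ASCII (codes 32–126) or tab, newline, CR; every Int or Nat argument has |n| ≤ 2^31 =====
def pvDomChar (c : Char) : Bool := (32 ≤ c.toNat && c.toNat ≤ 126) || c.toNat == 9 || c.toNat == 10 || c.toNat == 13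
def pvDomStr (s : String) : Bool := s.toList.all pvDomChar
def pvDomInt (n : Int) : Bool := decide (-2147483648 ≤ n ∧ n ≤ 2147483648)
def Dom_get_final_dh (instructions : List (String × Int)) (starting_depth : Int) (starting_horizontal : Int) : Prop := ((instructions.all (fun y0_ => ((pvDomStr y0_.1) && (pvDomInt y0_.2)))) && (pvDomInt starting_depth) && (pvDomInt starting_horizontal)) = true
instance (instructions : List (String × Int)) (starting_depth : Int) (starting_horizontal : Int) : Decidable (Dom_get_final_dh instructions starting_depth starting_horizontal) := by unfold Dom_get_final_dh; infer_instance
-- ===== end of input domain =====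

-- ===== PORT A =====
-- B: three filtered sums instead of one branchy accumulation loop (idiomatic decomposition).
def get_final_dh (instructions : List (String × Int)) (starting_depth : Int) (starting_horizontal : Int) : Int × Int :=
  let s := instructions.foldl
    (fun (st : Int × Int) p =>
      let (depth, horizontal) := st
      let (code, x) := p
      if code == "forward" then (depth, horizontal + x)
      else if code == "down" then (depth + x, horizontal)
      else if code == "up" then (depth - x, horizontal)
      else (depth, horizontal))
    (starting_depth, starting_horizontal)
  s

-- ===== PORT B =====
def get_final_dh_alt (instructions : List (String × Int)) (starting_depth : Int) (starting_horizontal : Int) : Int × Int :=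
  let items := instructions
  let horizontal := starting_horizontal +
    ((items.filter (fun p => p.1 == "forward")).map (fun p => p.2)).sum
  let depth := starting_depth +
    ((items.filter (fun p => p.1 == "down")).map (fun p => p.2)).sum -
    ((items.filter (fun p => p.1 == "up")).map (fun p => p.2)).sum
  (depth, horizontal)

-- ===== PRECONDITION & SPEC =====
def Spec_get_final_dh (instructions : List (String × Int)) (starting_depth : Int) (starting_horizontal : Int) (out : Int × Int) : Prop := out = get_final_dh_alt instructions starting_depth starting_horizontal
instance (instructions : List (String × Int)) (starting_depth : Int) (starting_horizontal : Int) (out : Int × Int) : Decidable (Spec_get_final_dh instructions starting_depth starting_horizontal out) := by unfold Spec_get_final_dh; infer_instance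

-- ===== CLAIM (what is proved, stated in full; the proofs are below) =====
def Claim_equal_get_final_dh : Prop := ∀ (instructions : List (String × Int)) (starting_depth : Int) (starting_horizontal : Int), Dom_get_final_dh instructions starting_depth starting_horizontal → Spec_get_final_dh instructions starting_depth starting_horizontal (get_final_dh instructions starting_depth starting_horizontal)

-- ===== LEMMAS AND PROOFS =====

-- ===== VERDICT (by name: the statement is the Claim_ definition above) =====
theorem aux_get_final_dh (instructions : List (String × Int)) :
    ∀ (d h : Int), get_final_dh instructions d h = get_final_dh_alt instructions d h := by
  induction instructions with
  | nil => intro d h; simp [get_final_dh, get_final_dh_alt]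
  | cons p rest ih =>
    intro d h
    obtain ⟨c, x⟩ := p
    simp only [get_final_dh, List.foldl_cons] at *
    by_cases hf : c = "forward"
    · have := ih d (h + x)
      simp [get_final_dh_alt, hf] at this ⊢
      rw [this, Prod.mk.injEq]
      exact ⟨rfl, by ring⟩
    · by_cases hd : c = "down"
      · have := ih (d + x) h
        simp [get_final_dh_alt, hd] at this ⊢
        rw [this, Prod.mk.injEq]
        exact ⟨by ring, rfl⟩
      · by_cases hu : c = "up"
        · have := ih (d - x) h
          simp [get_final_dh_alt, hu] at this ⊢
          rw [this, Prod.mk.injEq]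
          exact ⟨by ring, rfl⟩
        · have := ih d h
          simp [get_final_dh_alt, hf, hd, hu] at this ⊢
          exact this

theorem get_final_dh_spec : Claim_equal_get_final_dh := by
  intro instructions d h _
  unfold Spec_get_final_dh
  exact aux_get_final_dh instructions d h
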